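-- pv_equiv track=rewrite | github.com/institutional/grin-transfer | src/grin_transfer/docker/validation.py | translate_docker_data_path_for_local_storage
-- ===== SOURCE A (Python) =====
-- def translate_docker_data_path_for_local_storage(original_path: str) -> str:
--     """Translate docker-data relative paths to container paths for local storage.
--
--     Args:
--         original_path: The original path string from user
--
--     Returns:
--         Translated path for container use, or original path if no translation needed
--     """
--     # Handle docker-data relative paths from host perspective
--     if original_path.startswith("docker-data/"):
--         # Map docker-data subdirectories to their /app equivalents
--         docker_data_mappings = {
--             "docker-data/data/": "/app/data/",
--             "docker-data/output/": "/app/output/",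
--             "docker-data/logs/": "/app/logs/",
--             "docker-data/staging/": "/app/staging/",
--         }
--
--         # Check for specific subdirectory mappings first (longest prefix first)
--         for host_prefix, container_prefix in sorted(docker_data_mappings.items(), key=len, reverse=True):
--             if original_path.startswith(host_prefix):
--                 # Replace the host path with container path
--                 return original_path.replace(host_prefix, container_prefix, 1)
--
--         # For general docker-data/foo paths, map to /app/docker-data/foo
--         # This requires mounting ./docker-data:/app/docker-data in docker-compose.yml
--         return original_path.replace("docker-data/", "/app/docker-data/", 1)
--
--     return original_path
-- ===== SOURCE B (Python) =====
-- def translate_docker_data_path_for_local_storage(original_path: str) -> str: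
--     if original_path.startswith("docker-data/"):
--         rest = original_path[len("docker-data/"):]
--         seg, sep, _ = rest.partition("/")
--         if sep and seg in {"data", "output", "logs", "staging"}:
--             return "/app/" + rest
--         return "/app/docker-data/" + rest
--     return original_path
-- ===== Notes on version B (the rewrite author's own statement) =====
-- stated objective: simpler
-- what changed: Replaced the sorted-dict prefix loop and replace(...,1) calls with one slice of the fixed 'docker-data/' prefix, a single partition on '/', and a set-membership test on the first segment.
import Mathlib
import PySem

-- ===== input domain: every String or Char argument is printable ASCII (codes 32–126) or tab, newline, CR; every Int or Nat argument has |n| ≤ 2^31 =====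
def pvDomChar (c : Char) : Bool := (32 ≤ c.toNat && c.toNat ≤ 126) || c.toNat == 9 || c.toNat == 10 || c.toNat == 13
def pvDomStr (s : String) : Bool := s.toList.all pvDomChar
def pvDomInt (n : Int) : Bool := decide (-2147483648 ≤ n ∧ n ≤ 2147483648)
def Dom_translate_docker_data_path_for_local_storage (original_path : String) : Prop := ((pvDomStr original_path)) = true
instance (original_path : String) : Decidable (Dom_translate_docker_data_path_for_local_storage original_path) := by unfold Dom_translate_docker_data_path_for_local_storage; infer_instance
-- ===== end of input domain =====

-- B replaces A's sorted-mapping prefix loop with one slice + partition + set-membership test (simpler, same result).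

-- ===== PORT A =====
-- s.replace(old, new, 1): replace the first occurrence of old (exact, incl. old = "": Python inserts new at the front)
def pvReplace1 (s old new : List Char) : List Char :=
  let i := PySem.Chars.find s old
  if i = -1 then s else s.take i.toNat ++ new ++ s.drop (i.toNat + old.length)

-- the 'for host_prefix, container_prefix in sorted(...)' loop with its early return
def pvLoopA (p : String) : List (String × String) → Option String
  | [] => none
  | (h, c) :: t =>
    if PySem.Str.startswith p h then some (String.ofList (pvReplace1 p.toList h.toList c.toList))
    else pvLoopA p t

def translate_docker_data_path_for_local_storage (original_path : String) : String :=
  if PySem.Str.startswith original_path "docker-data/" then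
    let docker_data_mappings : List (String × String) :=
      [("docker-data/data/", "/app/data/"), ("docker-data/output/", "/app/output/"),
       ("docker-data/logs/", "/app/logs/"), ("docker-data/staging/", "/app/staging/")]
    -- key=len yields 2 for every (key, value) pair
    match pvLoopA original_path (PySem.List.sorted docker_data_mappings (fun _ => (2 : Int)) true) with
    | some r => r
    | none => String.ofList (pvReplace1 original_path.toList "docker-data/".toList "/app/docker-data/".toList)
  else original_path

-- ===== PORT B =====
def translate_docker_data_path_for_local_storage_alt (original_path : String) : String :=
  if PySem.Str.startswith original_path "docker-data/" then
    let rest := PySem.List.slice original_path.toList (some 12) none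
    -- rest.partition('/'): seg = text before the first '/', sep nonempty iff a '/' occurs
    let seg := rest.takeWhile (· ≠ '/')
    if seg.length < rest.length && ["data", "output", "logs", "staging"].contains (String.ofList seg) then
      String.ofList ("/app/".toList ++ rest)
    else
      String.ofList ("/app/docker-data/".toList ++ rest)
  else original_path

-- ===== PRECONDITION & SPEC =====
def Spec_translate_docker_data_path_for_local_storage (original_path : String) (out : String) : Prop := out = translate_docker_data_path_for_local_storage_alt original_path
instance (original_path : String) (out : String) : Decidable (Spec_translate_docker_data_path_for_local_storage original_path out) := by unfold Spec_translate_docker_data_path_for_local_storage; infer_instance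

-- ===== CLAIM (what is proved, stated in full; the proofs are below) =====
def Claim_equal_translate_docker_data_path_for_local_storage : Prop := ∀ (original_path : String), Dom_translate_docker_data_path_for_local_storage original_path → Spec_translate_docker_data_path_for_local_storage original_path (translate_docker_data_path_for_local_storage original_path)

-- ===== LEMMAS AND PROOFS =====

theorem find_of_prefix (s old : List Char) (h : old <+: s) : PySem.Chars.find s old = 0 := by
  have h0 : 0 ≤ PySem.Chars.find s old := (PySem.Chars.find_nonneg_iff s old).mpr h.isInfix
  obtain ⟨hpre, hmin⟩ := PySem.Chars.find_spec h0
  by_contra hne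
  exact hmin 0 (by omega) (by simpa using h)

theorem replace1_of_prefix (old t new : List Char) :
    pvReplace1 (old ++ t) old new = new ++ t := by
  unfold pvReplace1
  rw [find_of_prefix (old ++ t) old (List.prefix_append old t)]
  simp

theorem sw_iff (t r : List Char) (q : String) (hq : q.toList = "docker-data/".toList ++ r) :
    (PySem.Str.startswith (String.ofList ("docker-data/".toList ++ t)) q = true) ↔ r <+: t := by
  simp [PySem.Chars.startswith_iff, hq]

-- partition: the first segment of w ++ '/' :: u is w when w holds no '/'
theorem seg_of_lit (w u : List Char) (hw : '/' ∉ w) :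
    List.takeWhile (fun x => decide (x ≠ '/')) (w ++ '/' :: u) = w := by
  induction w with
  | nil => simp
  | cons a w ih =>
    simp only [List.mem_cons, not_or] at hw
    have ha : a ≠ '/' := fun h => hw.1 h.symm
    rw [List.cons_append, List.takeWhile_cons_of_pos (by simp [ha]), ih hw.2]

-- the first '/'-separated segment, followed by '/', is a prefix of t
theorem seg_slash_prefix (t : List Char) (h : (t.takeWhile (fun x => decide (x ≠ '/'))).length < t.length) :
    t.takeWhile (fun x => decide (x ≠ '/')) ++ ['/'] <+: t := by
  have hsplit : t.takeWhile (fun x => decide (x ≠ '/')) ++ t.dropWhile (fun x => decide (x ≠ '/')) = t :=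
    List.takeWhile_append_dropWhile
  have hne : t.dropWhile (fun x => decide (x ≠ '/')) ≠ [] := by
    intro hnil
    rw [hnil, List.append_nil] at hsplit
    rw [hsplit] at h
    exact lt_irrefl _ h
  obtain ⟨c, rest, hcr⟩ := List.exists_cons_of_ne_nil hne
  have hhead' : ∀ (hx : (c :: rest : List Char) ≠ []),
      decide ((c :: rest).head hx ≠ '/') = false := by
    rw [← hcr]
    intro hx
    exact List.head_dropWhile_not (fun x => decide (x ≠ '/')) hne
  have hc : c = '/' := by simpa using hhead' (List.cons_ne_nil c rest)
  rw [hc] at hcr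
  exact ⟨rest, by rw [List.append_assoc, List.singleton_append, ← hcr, hsplit]⟩

theorem core (t : List Char) :
    translate_docker_data_path_for_local_storage (String.ofList ("docker-data/".toList ++ t)) =
    translate_docker_data_path_for_local_storage_alt (String.ofList ("docker-data/".toList ++ t)) := by
  have hsw : PySem.Str.startswith (String.ofList ("docker-data/".toList ++ t)) "docker-data/" = true :=
    (sw_iff t [] "docker-data/" (by simp)).mpr (by simp)
  have hdrop : PySem.List.slice (String.ofList ("docker-data/".toList ++ t)).toList (some 12) none = t := by
    simp [pysem]
  unfold translate_docker_data_path_for_local_storage translate_docker_data_path_for_local_storage_alt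
  rw [if_pos hsw, if_pos hsw]
  simp only [hdrop]
  have hsort : PySem.List.sorted
      [("docker-data/data/", "/app/data/"), ("docker-data/output/", "/app/output/"),
       ("docker-data/logs/", "/app/logs/"), ("docker-data/staging/", "/app/staging/")]
      (fun _ => (2 : Int)) true =
      [("docker-data/data/", "/app/data/"), ("docker-data/output/", "/app/output/"),
       ("docker-data/logs/", "/app/logs/"), ("docker-data/staging/", "/app/staging/")] := rfl
  rw [hsort]
  simp only [pvLoopA]
  by_cases h1 : "data/".toList <+: t
  · obtain ⟨u, hu⟩ := h1; subst hu
    rw [if_pos ((sw_iff _ "data/".toList "docker-data/data/" rfl).mpr (List.prefix_append _ u))]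
    rw [show (String.ofList ("docker-data/".toList ++ ("data/".toList ++ u))).toList =
        "docker-data/data/".toList ++ u by simp]
    rw [replace1_of_prefix]
    rw [show ("data/".toList ++ u : List Char) = "data".toList ++ '/' :: u from rfl]
    rw [seg_of_lit "data".toList u (by decide), String.ofList_toList]
    rw [if_pos (by simp)]
    rfl
  · rw [if_neg (by rw [sw_iff _ "data/".toList "docker-data/data/" rfl]; exact h1)]
    by_cases h2 : "output/".toList <+: t
    · obtain ⟨u, hu⟩ := h2; subst hu
      rw [if_pos ((sw_iff _ "output/".toList "docker-data/output/" rfl).mpr (List.prefix_append _ u))]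
      rw [show (String.ofList ("docker-data/".toList ++ ("output/".toList ++ u))).toList =
          "docker-data/output/".toList ++ u by simp]
      rw [replace1_of_prefix]
      rw [show ("output/".toList ++ u : List Char) = "output".toList ++ '/' :: u from rfl]
      rw [seg_of_lit "output".toList u (by decide), String.ofList_toList]
      rw [if_pos (by simp)]
      rfl
    · rw [if_neg (by rw [sw_iff _ "output/".toList "docker-data/output/" rfl]; exact h2)]
      by_cases h3 : "logs/".toList <+: t
      · obtain ⟨u, hu⟩ := h3; subst hu
        rw [if_pos ((sw_iff _ "logs/".toList "docker-data/logs/" rfl).mpr (List.prefix_append _ u))]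
        rw [show (String.ofList ("docker-data/".toList ++ ("logs/".toList ++ u))).toList =
            "docker-data/logs/".toList ++ u by simp]
        rw [replace1_of_prefix]
        rw [show ("logs/".toList ++ u : List Char) = "logs".toList ++ '/' :: u from rfl]
        rw [seg_of_lit "logs".toList u (by decide), String.ofList_toList]
        rw [if_pos (by simp)]
        rfl
      · rw [if_neg (by rw [sw_iff _ "logs/".toList "docker-data/logs/" rfl]; exact h3)]
        by_cases h4 : "staging/".toList <+: t
        · obtain ⟨u, hu⟩ := h4; subst hu
          rw [if_pos ((sw_iff _ "staging/".toList "docker-data/staging/" rfl).mpr (List.prefix_append _ u))]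
          rw [show (String.ofList ("docker-data/".toList ++ ("staging/".toList ++ u))).toList =
              "docker-data/staging/".toList ++ u by simp]
          rw [replace1_of_prefix]
          rw [show ("staging/".toList ++ u : List Char) = "staging".toList ++ '/' :: u from rfl]
          rw [seg_of_lit "staging".toList u (by decide), String.ofList_toList]
          rw [if_pos (by simp)]
          rfl
        · rw [if_neg (by rw [sw_iff _ "staging/".toList "docker-data/staging/" rfl]; exact h4)]
          have hcond : (decide ((t.takeWhile (fun x => decide (x ≠ '/'))).length < t.length) &&
              ["data", "output", "logs", "staging"].contains
                (String.ofList (t.takeWhile (fun x => decide (x ≠ '/'))))) = false := by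
            by_contra hb
            simp only [Bool.and_eq_true, decide_eq_true_eq, Bool.not_eq_false] at hb
            obtain ⟨hlt, hmem⟩ := hb
            have hpre := seg_slash_prefix t hlt
            simp only [List.contains_eq_mem, List.mem_cons, List.not_mem_nil, or_false,
              decide_eq_true_eq] at hmem
            rcases hmem with h | h | h | h
            · have hseg : t.takeWhile (fun x => decide (x ≠ '/')) = "data".toList := by
                simpa using congrArg String.toList h
              rw [hseg] at hpre; exact h1 hpre
            · have hseg : t.takeWhile (fun x => decide (x ≠ '/')) = "output".toList := by
                simpa using congrArg String.toList h
              rw [hseg] at hpre; exact h2 hpre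
            · have hseg : t.takeWhile (fun x => decide (x ≠ '/')) = "logs".toList := by
                simpa using congrArg String.toList h
              rw [hseg] at hpre; exact h3 hpre
            · have hseg : t.takeWhile (fun x => decide (x ≠ '/')) = "staging".toList := by
                simpa using congrArg String.toList h
              rw [hseg] at hpre; exact h4 hpre
          rw [if_neg (by rw [hcond]; simp)]
          rw [show (String.ofList ("docker-data/".toList ++ t)).toList =
              "docker-data/".toList ++ t by simp]
          rw [replace1_of_prefix]

theorem main_eq (p : String) :
    translate_docker_data_path_for_local_storage p = translate_docker_data_path_for_local_storage_alt p := by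
  by_cases hs : PySem.Str.startswith p "docker-data/" = true
  · have hpre : "docker-data/".toList <+: p.toList := by
      simpa [PySem.Chars.startswith_iff] using hs
    obtain ⟨t, ht⟩ := hpre
    calc translate_docker_data_path_for_local_storage p
        = translate_docker_data_path_for_local_storage (String.ofList ("docker-data/".toList ++ t)) := by
          rw [ht, String.ofList_toList]
      _ = translate_docker_data_path_for_local_storage_alt (String.ofList ("docker-data/".toList ++ t)) := core t
      _ = translate_docker_data_path_for_local_storage_alt p := by rw [ht, String.ofList_toList]
  · unfold translate_docker_data_path_for_local_storage translate_docker_data_path_for_local_storage_alt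
    rw [if_neg hs, if_neg hs]

-- ===== VERDICT (by name: the statement is the Claim_ definition above) =====
theorem translate_docker_data_path_for_local_storage_spec : Claim_equal_translate_docker_data_path_for_local_storage := by
  intro p _
  unfold Spec_translate_docker_data_path_for_local_storage
  exact main_eq p
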